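-- pv_equiv track=rewrite | github.com/developfast/sonic-mgmt | ansible/scripts/update_links_for_breakout.py | format_vlan_range
-- ===== SOURCE A (Python) =====
-- def format_vlan_range(vlans):
--     """Format a set of VLAN IDs into a compact range string.
--
--     Produces contiguous ranges separated by commas.
--     E.g., {1, 2, 3, 5, 6, 8} -> '1-3,5-6,8'
--     """
--     if not vlans:
--         return ''
--     sorted_vlans = sorted(vlans)
--     ranges = []
--     start = end = sorted_vlans[0]
--     for v in sorted_vlans[1:]:
--         if v == end + 1:
--             end = v
--         else:
--             ranges.append(str(start) if start == end else f'{start}-{end}')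
--             start = end = v
--     ranges.append(str(start) if start == end else f'{start}-{end}')
--     return ','.join(ranges)
-- ===== SOURCE B (Python) =====
-- def _take_group(k, pairs, j):
--     """Collect values of the longest run pairs[j:] whose value - index == k; return them and the next position."""
--     g = []
--     while j < len(pairs) and pairs[j][1] - pairs[j][0] == k:
--         g.append(pairs[j][1])
--         j += 1
--     return g, j
--
--
-- def format_vlan_range(vlans):
--     """Format a set of VLAN IDs into a compact range string.
--
--     Group-based formulation: over enumerate(sorted(vlans)), a maximal run of
--     consecutive integers is exactly a maximal block of constant (value - index);
--     materialize each block, then format it from its first and last element.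
--     """
--     pairs = list(enumerate(sorted(vlans)))
--     parts = []
--     j = 0
--     while j < len(pairs):
--         i, v = pairs[j]
--         g, j = _take_group(v - i, pairs, j + 1)
--         block = [v] + g
--         parts.append(str(block[0]) if len(block) == 1 else f'{block[0]}-{block[-1]}')
--     return ','.join(parts)
-- ===== Notes on version B (the rewrite author's own statement) =====
-- stated objective: alternative
-- what changed: Replaces A's running start/end state machine with a groupby-style decomposition: chunk enumerate(sorted(vlans)) into maximal blocks of constant (value - index), then format each materialized block from its first and last element.
import Mathlib
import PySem

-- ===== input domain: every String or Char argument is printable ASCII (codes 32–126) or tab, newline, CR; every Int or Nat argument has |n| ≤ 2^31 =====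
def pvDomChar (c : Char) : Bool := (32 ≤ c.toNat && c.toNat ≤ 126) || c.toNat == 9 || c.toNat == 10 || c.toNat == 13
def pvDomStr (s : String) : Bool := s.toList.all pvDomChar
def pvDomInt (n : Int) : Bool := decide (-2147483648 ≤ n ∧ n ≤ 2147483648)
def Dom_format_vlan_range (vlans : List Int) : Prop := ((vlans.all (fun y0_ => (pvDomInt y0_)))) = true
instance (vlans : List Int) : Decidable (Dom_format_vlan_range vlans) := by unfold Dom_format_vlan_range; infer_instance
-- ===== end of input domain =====

-- B replaces A's running start/end state machine with a groupby-style decomposition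
-- (maximal blocks of constant value-index over the enumerated sorted list); same cost, alternative structure.


-- ===== PORT A =====
-- str(start) if start == end else f'{start}-{end}'
def fmtA (s e : Int) : String :=
  if s = e then PySem.Int.toStr s else PySem.Int.toStr s ++ "-" ++ PySem.Int.toStr e

-- the 'for v in sorted_vlans[1:]' loop, carrying (ranges, start, end); final append folded in
def loopA : List Int → List String → Int → Int → List String
  | [], rs, s, e => rs ++ [fmtA s e]
  | v :: t, rs, s, e =>
      if v = e + 1 then loopA t rs s v
      else loopA t (rs ++ [fmtA s e]) v v

def format_vlan_range (vlans : List Int) : String :=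
  if vlans = [] then ""
  else
    match PySem.List.sorted vlans (fun x => x) false with
    | [] => ""  -- unreachable: sorted of a non-empty list is non-empty
    | h :: t => PySem.Str.join "," (loopA t [] h h)

-- ===== PORT B =====
-- _take_group(k, pairs): longest prefix of (index, value) pairs with value - index == k
def takeGroup (k : Int) : List (Int × Int) → List Int × List (Int × Int)
  | [] => ([], [])
  | (i, v) :: t =>
      if v - i = k then
        let p := takeGroup k t
        (v :: p.1, p.2)
      else ([], (i, v) :: t)

theorem takeGroup_rest_le (k : Int) (l : List (Int × Int)) : (takeGroup k l).2.length ≤ l.length := by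
  induction l with
  | nil => simp [takeGroup]
  | cons p t ih =>
      obtain ⟨i, v⟩ := p
      simp only [takeGroup]
      split
      · exact Nat.le_succ_of_le ih
      · simp

-- the 'while pairs' loop of B: peel one block, format it, continue on the rest
def partsB : List (Int × Int) → List String
  | [] => []
  | (i, v) :: t =>
      let p := takeGroup (v - i) t
      (if p.1 = [] then PySem.Int.toStr v
       else PySem.Int.toStr v ++ "-" ++ PySem.Int.toStr (p.1.getLastD v)) :: partsB p.2
termination_by l => l.length
decreasing_by
  exact Nat.lt_succ_of_le (takeGroup_rest_le _ _)

def format_vlan_range_alt (vlans : List Int) : String :=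
  PySem.Str.join "," (partsB (PySem.List.enumerate (PySem.List.sorted vlans (fun x => x) false) 0))

-- ===== PRECONDITION & SPEC =====
def Spec_format_vlan_range (vlans : List Int) (out : String) : Prop := out = format_vlan_range_alt vlans
instance (vlans : List Int) (out : String) : Decidable (Spec_format_vlan_range vlans out) := by unfold Spec_format_vlan_range; infer_instance

-- ===== CLAIM (what is proved, stated in full; the proofs are below) =====
def Claim_equal_format_vlan_range : Prop := ∀ (vlans : List Int), Dom_format_vlan_range vlans → Spec_format_vlan_range vlans (format_vlan_range vlans)

-- ===== LEMMAS AND PROOFS =====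

-- proof-side view of one maximal run: runs e t = (maximal +1-step prefix from e, rest)
def runs : Int → List Int → List Int × List Int
  | _, [] => ([], [])
  | e, v :: t =>
      if v = e + 1 then
        let p := runs v t
        (v :: p.1, p.2)
      else ([], v :: t)

theorem runs_rest_le (e : Int) (t : List Int) : (runs e t).2.length ≤ t.length := by
  induction t generalizing e with
  | nil => simp [runs]
  | cons v t ih =>
      simp only [runs]
      split
      · exact Nat.le_succ_of_le (ih v)
      · simp

theorem runs_gt (e : Int) (t : List Int) : ∀ x ∈ (runs e t).1, e < x := by
  induction t generalizing e with
  | nil => simp [runs]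
  | cons v t ih =>
      simp only [runs]
      split
      · rename_i hv
        intro x hx
        rcases List.mem_cons.1 hx with h | h
        · omega
        · have := ih v x h; omega
      · simp

-- takeGroup on an enumerated tail computes exactly the proof-side run
theorem takeGroup_enum (t : List Int) (i e : Int) :
    takeGroup (e - i) (PySem.List.enumerate t (i + 1)) =
      ((runs e t).1, PySem.List.enumerate (runs e t).2 (i + 1 + (runs e t).1.length)) := by
  induction t generalizing i e with
  | nil => simp [runs, takeGroup, PySem.List.enumerate_nil]
  | cons v t ih =>
      rw [PySem.List.enumerate_cons]
      simp only [takeGroup, runs]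
      by_cases hv : v = e + 1
      · have hk : v - (i + 1) = e - i := by omega
        have hk2 : (v - (i + 1) = e - i) = True := by simp [hk]
        rw [if_pos hk, if_pos hv]
        have := ih (i + 1) v
        have hkey : v - (i + 1) = e - i := hk
        rw [← hkey] at *
        rw [ih (i + 1) v |>.symm] at *
        -- rebuild with the IH
        have h' : takeGroup (v - (i+1)) (PySem.List.enumerate t (i + 1 + 1)) =
            ((runs v t).1, PySem.List.enumerate (runs v t).2 (i + 1 + 1 + (runs v t).1.length)) := by
          have := ih (i + 1) v
          simpa using this
        rw [h']
        simp only [List.length_cons]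
        congr 1
        congr 1
        push_cast
        ring
      · have hk : ¬ (v - (i + 1) = e - i) := by omega
        rw [if_neg hk, if_neg hv]
        simp [PySem.List.enumerate_cons]

-- A's loop, written as: close the current run, then restart on what is left
theorem loopA_eq (t : List Int) : ∀ (s e : Int) (rs : List String),
    loopA t rs s e = (rs ++ [fmtA s ((runs e t).1.getLastD e)]) ++
      (match (runs e t).2 with
       | [] => []
       | v :: t' => loopA t' [] v v) := by
  induction t with
  | nil => intro s e rs; simp [loopA, runs]
  | cons v t ih =>
      intro s e rs
      simp only [loopA, runs]
      by_cases hv : v = e + 1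
      · rw [if_pos hv, if_pos hv, ih s v rs]
        rw [List.getLastD_cons]
      · rw [if_neg hv, if_neg hv]
        have h2 := ih v v []
        simp only [List.nil_append] at h2
        rw [ih v v (rs ++ [fmtA s e])]
        show _ = rs ++ [fmtA s (List.getLastD [] e)] ++ loopA t [] v v
        rw [h2, List.getLastD_nil]
        simp [List.append_assoc]

-- MAIN: starting a fresh run at v, A's loop and B's block loop produce the same pieces
theorem main_eq (n : Nat) : ∀ (t : List Int), t.length ≤ n → ∀ (i v : Int),
    loopA t [] v v = partsB (PySem.List.enumerate (v :: t) i) := by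
  induction n with
  | zero =>
      intro t ht i v
      have : t = [] := List.eq_nil_of_length_eq_zero (Nat.le_zero.1 ht)
      subst this
      simp [loopA, PySem.List.enumerate_cons, PySem.List.enumerate_nil, partsB, takeGroup, fmtA]
  | succ n ih =>
      intro t ht i v
      rw [PySem.List.enumerate_cons]
      rw [partsB]
      have htg := takeGroup_enum t i v
      rw [htg, loopA_eq t v v []]
      simp only [List.nil_append, List.singleton_append]
      have hhead : fmtA v ((runs v t).1.getLastD v) =
          (if (runs v t).1 = [] then PySem.Int.toStr v
           else PySem.Int.toStr v ++ "-" ++ PySem.Int.toStr ((runs v t).1.getLastD v)) := by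
        by_cases hg : (runs v t).1 = []
        · simp [hg, fmtA]
        · have hmem : (runs v t).1.getLastD v ∈ (runs v t).1 := by
            rcases List.exists_cons_of_ne_nil hg with ⟨a, l, h⟩
            rw [h, List.getLastD_cons]
            exact List.getLastD_mem_cons
          have hlt : v < (runs v t).1.getLastD v := runs_gt v t _ hmem
          have hne : v ≠ (runs v t).1.getLastD v := by omega
          rw [if_neg hg]
          unfold fmtA
          rw [if_neg hne]
      have htail : (match (runs v t).2 with
            | [] => []
            | w :: t' => loopA t' [] w w) =
          partsB (PySem.List.enumerate (runs v t).2 (i + 1 + ((runs v t).1.length : Int))) := by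
        rcases hrest : (runs v t).2 with _ | ⟨w, t''⟩
        · simp only [PySem.List.enumerate_nil, partsB]
        · have hle : (runs v t).2.length ≤ t.length := runs_rest_le v t
          rw [hrest] at hle
          simp only [List.length_cons] at hle
          exact ih t'' (by omega) (i + 1 + ((runs v t).1.length : Int)) w
      rw [hhead, htail]

theorem sorted_nonempty (vlans : List Int) (h : vlans ≠ []) :
    PySem.List.sorted vlans (fun x => x) false ≠ [] := by
  intro hs
  exact h ((PySem.List.sorted_eq_nil_iff vlans (fun x => x) false).mp hs)

-- ===== VERDICT (by name: the statement is the Claim_ definition above) =====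
theorem format_vlan_range_spec : Claim_equal_format_vlan_range := by
  intro vlans _
  unfold Spec_format_vlan_range format_vlan_range format_vlan_range_alt
  by_cases h : vlans = []
  · subst h
    simp [PySem.List.sorted, partsB, PySem.List.enumerate_nil]
    decide
  · rw [if_neg h]
    rcases hs : PySem.List.sorted vlans (fun x => x) false with _ | ⟨hd, t⟩
    · exact absurd hs (sorted_nonempty vlans h)
    · show PySem.Str.join "," (loopA t [] hd hd) = _
      rw [main_eq t.length t le_rfl 0 hd]
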